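-- pv_equiv track=rewrite | github.com/7themadhatter7/allwatchedoverbymachinesoflovinggrace.github.io | e8_platform_release/e8_arc_agent/e8_decoder_v2.py | _check_half_rule
-- ===== SOURCE A (Python) =====
-- def _check_half_rule(partial):
--     if not partial:
--         return None
--     items = list(partial.items())
--     if all(v == c // 2 for c, v in items):
--         return 'v // 2'
--     if all(v == (c * 2) % 10 for c, v in items):
--         return '(v * 2) % 10'
--     if all(v == (c * 3) % 10 for c, v in items):
--         return '(v * 3) % 10'
--     out_vals = set(v for _, v in items)
--     if len(out_vals) == 1:
--         return str(out_vals.pop())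
--     return None
-- ===== SOURCE B (Python) =====
-- def _check_half_rule(partial):
--     items = list(partial.items())
--     if not items:
--         return None
--     # candidate-elimination: keep the rules consistent with every item seen so far
--     candidates = [('v // 2', lambda c: c // 2),
--                   ('(v * 2) % 10', lambda c: (c * 2) % 10),
--                   ('(v * 3) % 10', lambda c: (c * 3) % 10)]
--     v0 = items[0][1]
--     constant = True
--     for c, v in items:
--         candidates = [(name, f) for name, f in candidates if f(c) == v]
--         constant = constant and v == v0
--     if candidates:
--         return candidates[0][0]
--     if constant:
--         return str(v0)
--     return None
-- ===== Notes on version B (the rewrite author's own statement) =====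
-- stated objective: alternative
-- what changed: Replaced A's fixed sequence of whole-list rule scans plus a value set by a candidate-elimination pass: a list of (name, function) rule candidates is filtered down by each item, the first survivor wins, and the constant fallback compares every value to the first value instead of building a set.
import Mathlib
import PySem

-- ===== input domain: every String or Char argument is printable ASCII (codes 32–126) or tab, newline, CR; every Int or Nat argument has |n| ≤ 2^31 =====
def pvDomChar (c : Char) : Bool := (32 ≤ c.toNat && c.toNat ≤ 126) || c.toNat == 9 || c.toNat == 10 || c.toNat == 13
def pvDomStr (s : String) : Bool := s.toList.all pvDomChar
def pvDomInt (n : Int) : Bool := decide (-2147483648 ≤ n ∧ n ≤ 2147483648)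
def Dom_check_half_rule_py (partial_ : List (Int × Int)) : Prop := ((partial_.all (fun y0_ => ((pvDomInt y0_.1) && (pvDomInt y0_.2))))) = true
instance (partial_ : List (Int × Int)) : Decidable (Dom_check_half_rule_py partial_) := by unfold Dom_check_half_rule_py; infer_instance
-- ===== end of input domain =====

-- B replaces A's fixed sequence of whole-list rule scans plus a value set by a single
-- candidate-elimination pass over a list of rule candidates, with a first-value constant check
-- (objective: alternative, same cost).
-- ===== PORT A =====
-- Literal port of A: empty guard, then three all(...) scans, then the value set.
-- set.pop() on a one-element set returns that element: ported as headD 0 under len = 1.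
def check_half_rule_py (partial_ : List (Int × Int)) : Option String :=
  if partial_ = [] then none
  else
    let items := partial_
    if items.all (fun cv => decide (cv.2 = PySem.Int.floordiv cv.1 2)) then some "v // 2"
    else if items.all (fun cv => decide (cv.2 = PySem.Int.mod (cv.1 * 2) 10)) then some "(v * 2) % 10"
    else if items.all (fun cv => decide (cv.2 = PySem.Int.mod (cv.1 * 3) 10)) then some "(v * 3) % 10"
    else
      let out_vals : PySem.Set Int := PySem.Set.ofList (items.map (fun cv => cv.2))
      if PySem.Set.len out_vals = 1 then some (PySem.Int.toStr (out_vals.headD 0))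
      else none

-- ===== PORT B =====
-- Port of Source B: candidate-elimination — filter the surviving rule candidates item by item,
-- while carrying the 'constant' flag (every value equals the first value).
def check_half_rule_py_alt (partial_ : List (Int × Int)) : Option String :=
  match partial_ with
  | [] => none
  | (_, v0) :: _ =>
    let candidates : List (String × (Int → Int)) :=
      [("v // 2", fun c => PySem.Int.floordiv c 2),
       ("(v * 2) % 10", fun c => PySem.Int.mod (c * 2) 10),
       ("(v * 3) % 10", fun c => PySem.Int.mod (c * 3) 10)]
    let st := partial_.foldl
      (fun (st : List (String × (Int → Int)) × Bool) cv =>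
        (st.1.filter (fun r => decide (r.2 cv.1 = cv.2)), st.2 && decide (cv.2 = v0)))
      (candidates, true)
    match st.1 with
    | r :: _ => some r.1
    | [] => if st.2 then some (PySem.Int.toStr v0) else none

-- ===== PRECONDITION & SPEC =====
def Spec_check_half_rule_py (partial_ : List (Int × Int)) (out : Option String) : Prop := out = check_half_rule_py_alt partial_
instance (partial_ : List (Int × Int)) (out : Option String) : Decidable (Spec_check_half_rule_py partial_ out) := by unfold Spec_check_half_rule_py; infer_instance

-- ===== CLAIM =====
def Claim_equal_check_half_rule_py : Prop := ∀ (partial_ : List (Int × Int)), Dom_check_half_rule_py partial_ → Spec_check_half_rule_py partial_ (check_half_rule_py partial_)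

-- ===== LEMMAS AND PROOFS =====

-- Characterisation of B's fold: the surviving candidates are the initial candidates filtered by
-- "consistent with every item", and the flag is the initial flag ANDed with the all-scan.
theorem chr_fold_char (v0 : Int) (xs : List (Int × Int))
    (rs : List (String × (Int → Int))) (b : Bool) :
    xs.foldl
      (fun (st : List (String × (Int → Int)) × Bool) cv =>
        (st.1.filter (fun r => decide (r.2 cv.1 = cv.2)), st.2 && decide (cv.2 = v0)))
      (rs, b)
    = (rs.filter (fun r => xs.all (fun cv => decide (r.2 cv.1 = cv.2))),
       b && xs.all (fun cv => decide (cv.2 = v0))) := by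
  induction xs generalizing rs b with
  | nil => simp
  | cons x xs ih =>
      rw [List.foldl_cons, ih]
      simp [List.filter_filter, List.all_cons, Bool.and_assoc, Bool.and_comm]


-- foldl Set.add keeps the head of a nonempty starting set.
theorem chr_foldl_add_head? (xs : List Int) :
    ∀ (v : Int) (s : List Int), (xs.foldl PySem.Set.add (v :: s)).head? = some v := by
  induction xs with
  | nil => intro v s; rfl
  | cons x xs ih =>
      intro v s
      rw [List.foldl_cons]
      unfold PySem.Set.add
      split
      · exact ih v s
      · exact ih v (s ++ [x])

-- foldl Set.add never shrinks the set.
theorem chr_foldl_add_len_le (xs : List Int) :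
    ∀ (s : List Int), s.length ≤ (xs.foldl PySem.Set.add s).length := by
  induction xs with
  | nil => intro s; simp
  | cons x xs ih =>
      intro s
      refine le_trans ?_ (ih (PySem.Set.add s x))
      unfold PySem.Set.add
      split
      · exact le_refl _
      · simp

-- The set of values of a nonempty list has one element iff every value equals the first.
theorem chr_len_one_iff (xs : List Int) :
    ∀ (v : Int), ((xs.foldl PySem.Set.add [v]).length = 1) ↔ xs.all (fun x => decide (x = v)) := by
  induction xs with
  | nil => intro v; simp
  | cons x xs ih =>
      intro v
      rw [List.foldl_cons]
      by_cases hx : x = v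
      · have ha : PySem.Set.add [v] x = [v] := by
          simp [PySem.Set.add, PySem.Set.contains, hx]
        rw [ha, ih]
        simp [hx]
      · have ha : PySem.Set.add [v] x = [v, x] := by
          simp [PySem.Set.add, PySem.Set.contains, hx]
        rw [ha]
        have h2 : (2 : Nat) ≤ (xs.foldl PySem.Set.add [v, x]).length :=
          chr_foldl_add_len_le xs [v, x]
        simp [hx]
        omega

-- The two orientations of the per-item equality give the same all-scan.
theorem chr_all_flip (f : Int → Int) (l : List (Int × Int)) :
    (l.all fun cv => decide (f cv.1 = cv.2)) = (l.all fun cv => decide (cv.2 = f cv.1)) := by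
  induction l with
  | nil => rfl
  | cons x l ih => simp [List.all_cons, eq_comm]

-- ===== VERDICT =====
theorem check_half_rule_py_spec : Claim_equal_check_half_rule_py := by
  intro xs _
  unfold Spec_check_half_rule_py
  match xs with
  | [] => rfl
  | (c0, v0) :: rest =>
    unfold check_half_rule_py check_half_rule_py_alt
    simp only [chr_fold_char, reduceCtorEq, if_false, Bool.true_and, chr_all_flip]
    simp only [Order.lt_two_iff, zero_le_one, PySem.Int.floordiv_eq_ediv_of_pos,
      Nat.ofNat_pos, PySem.Int.mod_eq_emod_of_pos]
    by_cases h1 : (decide (v0 = c0 / 2)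
        && rest.all fun cv => decide (cv.2 = cv.1 / 2)) = true
    · simp [List.filter, List.all_cons, h1]
    · by_cases h2 : (decide (v0 = c0 * 2 % 10)
          && rest.all fun cv => decide (cv.2 = cv.1 * 2 % 10)) = true
      · simp [List.filter, List.all_cons, h1, h2]
      · by_cases h3 : (decide (v0 = c0 * 3 % 10)
            && rest.all fun cv => decide (cv.2 = cv.1 * 3 % 10)) = true
        · simp [List.filter, List.all_cons, h1, h2, h3]
        · have hset : PySem.Set.ofList (((c0, v0) :: rest).map (fun cv => cv.2))
              = (rest.map (fun cv => cv.2)).foldl PySem.Set.add [v0] := by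
            rw [PySem.Set.ofList_eq_foldl]
            rfl
          have hlen : (PySem.Set.len (PySem.Set.ofList (((c0, v0) :: rest).map (fun cv => cv.2))) = 1)
              ↔ ((rest.all fun cv => decide (cv.2 = v0)) = true) := by
            rw [hset, PySem.Set.len]
            constructor
            · intro h
              have := (chr_len_one_iff (rest.map (fun cv => cv.2)) v0).mp (by omega)
              simp only [List.all_map] at this
              simpa using this
            · intro h
              have hall : (rest.map (fun cv => cv.2)).all (fun x => decide (x = v0)) := by
                simp only [List.all_map]
                simpa using h
              have := (chr_len_one_iff (rest.map (fun cv => cv.2)) v0).mpr hall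
              omega
          have hhead : (PySem.Set.ofList (((c0, v0) :: rest).map (fun cv => cv.2))).head? = some v0 := by
            rw [hset]
            exact chr_foldl_add_head? (rest.map (fun cv => cv.2)) v0 []
          by_cases hc : (rest.all fun cv => decide (cv.2 = v0)) = true
          · have hl := hlen.mpr hc
            simp only [List.map_cons] at hl hhead
            simp [List.filter, List.all_cons, h1, h2, h3, hc, PySem.Set.len] at hl ⊢
            simp [hl, hhead]
          · have hl := fun h => hc (hlen.mp h)
            simp only [List.map_cons] at hl hhead
            simp [List.filter, List.all_cons, h1, h2, h3, hc, PySem.Set.len] at hl ⊢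
            omega
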